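-- pv_equiv track=rewrite | github.com/thundercrawl/book-of-qna-code | ch6/preprocess_wiki.py | listwise_data
-- ===== SOURCE A (Python) =====
-- def listwise_data(corpus):
--     # (q, a_list)
--     listwise_corpus = dict()
--     for sample in corpus:
--         qid, q, aid, a, label = sample
--         listwise_corpus.setdefault(qid, dict())
--         listwise_corpus[qid].setdefault('a', list())
--         listwise_corpus[qid]['q'] = q
--         listwise_corpus[qid]['a'].append(a)
--     real_listwise_corpus = []
--     for qid in listwise_corpus:
--         q = listwise_corpus[qid]['q']
--         alist = listwise_corpus[qid]['a']
--         real_listwise_corpus.append((q, alist))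
--     return real_listwise_corpus
-- ===== SOURCE B (Python) =====
-- def listwise_data(corpus):
--     out = []
--     for qid in dict.fromkeys(s[0] for s in corpus):
--         group = [s for s in corpus if s[0] == qid]
--         out.append((group[-1][1], [s[3] for s in group]))
--     return out
-- ===== Notes on version B (the rewrite author's own statement) =====
-- stated objective: simpler
-- what changed: Replaces the dict-of-dicts grouping plus rebuild pass with a direct per-question construction: dedup the question ids in first-appearance order, then for each id take the last q and all a's from one filtered scan.
import Mathlib
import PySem

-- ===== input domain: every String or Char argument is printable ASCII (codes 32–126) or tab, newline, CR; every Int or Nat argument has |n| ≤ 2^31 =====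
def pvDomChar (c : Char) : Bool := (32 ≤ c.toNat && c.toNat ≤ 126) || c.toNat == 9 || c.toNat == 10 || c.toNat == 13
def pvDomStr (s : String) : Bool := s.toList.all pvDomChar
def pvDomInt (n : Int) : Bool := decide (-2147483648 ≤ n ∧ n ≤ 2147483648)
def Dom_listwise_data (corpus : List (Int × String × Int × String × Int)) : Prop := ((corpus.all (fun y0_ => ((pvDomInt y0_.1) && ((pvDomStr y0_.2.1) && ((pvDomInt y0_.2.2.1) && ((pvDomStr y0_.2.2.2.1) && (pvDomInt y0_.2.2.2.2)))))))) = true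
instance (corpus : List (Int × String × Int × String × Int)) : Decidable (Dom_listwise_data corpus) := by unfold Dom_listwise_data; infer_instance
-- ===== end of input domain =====

-- B replaces A's dict-of-dicts grouping plus rebuild pass with a direct per-question
-- construction (dedup the ids, then one filtered scan per id); objective: simpler.

-- ===== PORT A =====
-- A's inner Python dict holds exactly the keys 'q' (a string) and 'a' (a list); PySem.Dict
-- is homogeneous, so it is ported by hand as a two-field record of Options (none = key
-- absent); each access by the literal key 'q'/'a' becomes the field access — exact, since
-- the inner dict is only ever read by those keys (its own key order is never observed).
structure PVInner where
  qv : Option String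
  av : Option (List String)
deriving Repr, DecidableEq

def pvStepA (d : PySem.Dict Int PVInner) (s : Int × String × Int × String × Int) : PySem.Dict Int PVInner :=
  -- qid, q, aid, a, label = sample
  let d := d.setdefault s.1 ⟨none, none⟩                                -- setdefault(qid, dict())
  let inner := d.getD s.1 ⟨none, none⟩
  let inner := { inner with av := some (inner.av.getD []) }             -- setdefault('a', list())
  let inner := { inner with qv := some s.2.1 }                          -- ['q'] = q
  let inner := { inner with av := inner.av.map (fun xs => xs ++ [s.2.2.2.1]) }  -- ['a'].append(a)
  d.insert s.1 inner

def listwise_data (corpus : List (Int × String × Int × String × Int)) : List (String × List String) :=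
  let d := corpus.foldl pvStepA PySem.Dict.empty
  d.keys.foldl (fun acc qid =>
    -- d[qid]['q'] / d[qid]['a']: both keys are always present for qid ∈ keys, so the
    -- getD defaults are never used (KeyError impossible in the Python) — exact.
    let inner := d.getD qid ⟨none, none⟩
    acc ++ [(inner.qv.getD "", inner.av.getD [])]) []

-- ===== PORT B =====
def listwise_data_alt (corpus : List (Int × String × Int × String × Int)) : List (String × List String) :=
  (PySem.List.dedup (corpus.map (·.1))).foldl (fun out qid =>
    let group := corpus.filter (fun s => s.1 == qid)
    -- group[-1]: qid came from the dedup of the ids, so group ≠ [] and pyGet? is some;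
    -- the getD default is never used (IndexError impossible in the Python) — exact.
    out ++ [(((PySem.List.pyGet? group (-1)).map (fun s => s.2.1)).getD "", group.map (fun s => s.2.2.2.1))]) []

-- ===== PRECONDITION & SPEC =====
def Spec_listwise_data (corpus : List (Int × String × Int × String × Int)) (out : List (String × List String)) : Prop := out = listwise_data_alt corpus
instance (corpus : List (Int × String × Int × String × Int)) (out : List (String × List String)) : Decidable (Spec_listwise_data corpus out) := by unfold Spec_listwise_data; infer_instance

-- ===== CLAIM (what is proved, stated in full; the proofs are below) =====
def Claim_equal_listwise_data : Prop := ∀ (corpus : List (Int × String × Int × String × Int)), Dom_listwise_data corpus → Spec_listwise_data corpus (listwise_data corpus)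

-- ===== LEMMAS AND PROOFS =====

lemma keys_insert_setdefault {κ ν : Type} [BEq κ] [LawfulBEq κ] (d : PySem.Dict κ ν) (k : κ) (v w : ν) :
    ((d.setdefault k v).insert k w).keys = PySem.Set.add d.keys k := by
  by_cases h : d.contains k = true
  · rw [PySem.Dict.setdefault_of_contains _ _ h, PySem.Dict.keys_insert_of_contains _ _ h]
    simp [PySem.Set.add, PySem.Set.contains,
      ← PySem.Dict.contains_iff_mem_keys d k, h]
  · have hf : d.contains k = false := by simpa using h
    rw [PySem.Dict.setdefault_of_not_contains _ _ hf,
      PySem.Dict.keys_insert_of_contains _ _ (PySem.Dict.contains_insert_self d k v),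
      PySem.Dict.keys_insert_of_not_contains _ _ hf]
    simp [PySem.Set.add, PySem.Set.contains,
      ← PySem.Dict.contains_iff_mem_keys d k, hf]

-- the per-sample update of the record held at a key
def pvH (v : PVInner) (s : Int × String × Int × String × Int) : PVInner :=
  ⟨some s.2.1, some (v.av.getD [] ++ [s.2.2.2.1])⟩

lemma pvStepA_getD (d : PySem.Dict Int PVInner) (s : Int × String × Int × String × Int) (k : Int) :
    (pvStepA d s).getD k ⟨none, none⟩ =
      if s.1 = k then pvH (d.getD k ⟨none, none⟩) s else d.getD k ⟨none, none⟩ := by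
  by_cases h : s.1 = k
  · subst h
    simp [pvStepA, pvH, PySem.Dict.getD_insert_self, PySem.Dict.getD_setdefault_self]
  · have h2 : k ≠ s.1 := Ne.symm h
    rw [if_neg h]
    simp only [pvStepA, PySem.Dict.getD_eq_get?_getD,
      PySem.Dict.get?_insert_of_ne _ _ h2, PySem.Dict.get?_setdefault_of_ne _ _ h2]

lemma foldA_getD (l : List (Int × String × Int × String × Int)) (d : PySem.Dict Int PVInner) (k : Int) :
    (l.foldl pvStepA d).getD k ⟨none, none⟩ =
      (l.filter (fun s => s.1 == k)).foldl pvH (d.getD k ⟨none, none⟩) := by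
  induction l generalizing d with
  | nil => simp
  | cons s l ih =>
    rw [List.foldl_cons, ih, List.filter_cons]
    by_cases h : s.1 = k
    · simp [h, pvStepA_getD]
    · simp [h, pvStepA_getD]

lemma pvStepA_keys (d : PySem.Dict Int PVInner) (s : Int × String × Int × String × Int) :
    (pvStepA d s).keys = PySem.Set.add d.keys s.1 := by
  show ((d.setdefault s.1 _).insert s.1 _).keys = _
  exact keys_insert_setdefault d s.1 _ _

lemma foldA_keys (l : List (Int × String × Int × String × Int)) (d : PySem.Dict Int PVInner) :
    (l.foldl pvStepA d).keys = PySem.Set.update d.keys (l.map (·.1)) := by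
  induction l generalizing d with
  | nil => simp [PySem.Set.update]
  | cons s l ih => simp [List.foldl_cons, ih, pvStepA_keys, PySem.Set.update]

lemma foldH_cons (l : List (Int × String × Int × String × Int)) (s : Int × String × Int × String × Int) (v : PVInner) :
    ((s :: l).foldl pvH v) = ⟨(s :: l).getLast?.map (fun t => t.2.1), some (v.av.getD [] ++ (s :: l).map (fun t => t.2.2.2.1))⟩ := by
  induction l generalizing s v with
  | nil => simp [pvH]
  | cons t l ih =>
    rw [List.foldl_cons, ih]
    simp [pvH, List.getLast?_cons_cons]

lemma foldl_append_map {α β : Type} (l : List α) (f : α → β) (init : List β) :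
    l.foldl (fun acc x => acc ++ [f x]) init = init ++ l.map f := by
  induction l generalizing init with
  | nil => simp
  | cons x xs ih => simp [List.foldl_cons, ih]

lemma pyGet_neg_one {α : Type} (xs : List α) (h : xs ≠ []) :
    PySem.List.pyGet? xs (-1) = xs.getLast? := by
  have hl : 1 ≤ xs.length := List.length_pos_iff.mpr h
  simp [PySem.List.pyGet?, PySem.List.pyIdx?, hl, List.getLast?_eq_getElem?,
    List.getElem?_eq_getElem (Nat.sub_lt hl Nat.one_pos)]

-- the two per-question entry builders (A's read-out of its dict; B's filtered scan)
def pvF (d : PySem.Dict Int PVInner) (qid : Int) : String × List String :=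
  ((d.getD qid ⟨none, none⟩).qv.getD "", (d.getD qid ⟨none, none⟩).av.getD [])

def pvG (corpus : List (Int × String × Int × String × Int)) (qid : Int) : String × List String :=
  (((PySem.List.pyGet? (corpus.filter (fun s => s.1 == qid)) (-1)).map (fun s => s.2.1)).getD "",
   (corpus.filter (fun s => s.1 == qid)).map (fun s => s.2.2.2.1))

lemma pvF_eq_pvG (corpus : List (Int × String × Int × String × Int)) (qid : Int)
    (hmem : qid ∈ PySem.List.dedup (corpus.map (·.1))) :
    pvF (corpus.foldl pvStepA PySem.Dict.empty) qid = pvG corpus qid := by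
  have hx : qid ∈ corpus.map (·.1) := (PySem.List.mem_dedup _ _).mp hmem
  have hne : corpus.filter (fun s => s.1 == qid) ≠ [] := by
    rcases List.mem_map.mp hx with ⟨s, hs, hq⟩
    intro hnil
    exact absurd (by simpa using hq)
      (by simpa using (List.filter_eq_nil_iff.mp hnil) s hs)
  rcases List.exists_cons_of_ne_nil hne with ⟨t, l, hcons⟩
  have hd : (corpus.foldl pvStepA PySem.Dict.empty).getD qid ⟨none, none⟩
      = (corpus.filter (fun s => s.1 == qid)).foldl pvH ⟨none, none⟩ := by
    rw [foldA_getD]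
    simp [PySem.Dict.getD_empty]
  unfold pvF pvG
  rw [hd, hcons, foldH_cons, pyGet_neg_one _ (hcons ▸ hne)]
  simp

-- ===== VERDICT (by name: the statement is the Claim_ definition above) =====
theorem listwise_data_spec : Claim_equal_listwise_data := by
  intro corpus _
  show listwise_data corpus = listwise_data_alt corpus
  have hA : listwise_data corpus
      = ((corpus.foldl pvStepA PySem.Dict.empty).keys).map (pvF (corpus.foldl pvStepA PySem.Dict.empty)) := by
    show ((corpus.foldl pvStepA PySem.Dict.empty).keys).foldl
        (fun acc qid => acc ++ [pvF (corpus.foldl pvStepA PySem.Dict.empty) qid]) [] = _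
    rw [foldl_append_map]; simp
  have hB : listwise_data_alt corpus
      = (PySem.List.dedup (corpus.map (·.1))).map (pvG corpus) := by
    show (PySem.List.dedup (corpus.map (·.1))).foldl
        (fun out qid => out ++ [pvG corpus qid]) [] = _
    rw [foldl_append_map]; simp
  have hkeys : (corpus.foldl pvStepA PySem.Dict.empty).keys = PySem.List.dedup (corpus.map (·.1)) := by
    rw [foldA_keys, PySem.List.dedup_eq_ofList]
    rfl
  rw [hA, hB, hkeys]
  exact List.map_congr_left (fun qid hmem => pvF_eq_pvG corpus qid hmem)
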